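-- pv_equiv track=rewrite | github.com/sarav18302/AI-BASED-RESUME-PARSER | core/parser2.py | filter_education
-- ===== SOURCE A (Python) =====
-- def filter_education(education):
--     ms, bs, dip = False, False, False
--     for deg in education:
--         deg = deg.replace("."," ")
--         if deg in ['p.hd','phd','p hd','doctorate']:
--             return 'P.hD'
--     for deg in education:
--         deg = deg.replace(".", " ")
--         if deg in ['master','masters','ms','m s','msc','m sc','mba','mcom','m com','mca','m tech','mtech','m b a','m phil','ca','c a']:
--             return 'M.Sc'
--     for deg in education:
--         deg = deg.replace(".", " ")
--         if deg in ['m tech','mtech','m b a','m phil','ca','c a']: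
--             return 'M.Tech'
--     for deg in education:
--         deg = deg.replace(".", " ")
--         if deg in ['m b a','m phil','ca','c a']:
--             return 'M.B.A'
--     for deg in education:
--         deg = deg.replace(".", " ")
--         if deg in ['m phil']:
--             return 'M.phil'
--     for deg in education:
--         deg = deg.replace(".", " ")
--         if deg == 'bca' or deg=='b ca':
--             return 'BCA'
--     for deg in education:
--         deg = deg.replace(".", " ")
--         if deg in ['ca','c a']:
--             return 'CA'
--     for deg in education:
--         deg = deg.replace(".", " ")
--         if deg in ['bs','bsc','bachelor','bachelors','b s','b sc','be','b e','btech','b tech','ba','b a','bca','b ca','b com','bcom']: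
--             return
--     else:
--         try:
--             return education[0]
--         except:
--             return education
-- ===== SOURCE B (Python) =====
-- _PHD = ('p.hd', 'phd', 'p hd', 'doctorate')
-- _MASTER = ('master','masters','ms','m s','msc','m sc','mba','mcom','m com','mca','m tech','mtech','m b a','m phil','ca','c a')
-- _BCA = ('bca', 'b ca')
-- _BACHELOR = ('bs','bsc','bachelor','bachelors','b s','b sc','be','b e','btech','b tech','ba','b a','bca','b ca','b com','bcom')
--
--
-- def _priority(deg):
--     if deg in _PHD:
--         return 0
--     if deg in _MASTER:
--         return 1
--     if deg in _BCA:
--         return 2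
--     if deg in _BACHELOR:
--         return 3
--     return None
--
--
-- def filter_education(education):
--     best = None
--     for deg in education:
--         p = _priority(deg.replace(".", " "))
--         if p == 0:
--             return 'P.hD'
--         if p is not None and (best is None or p < best):
--             best = p
--     if best == 1:
--         return 'M.Sc'
--     if best == 2:
--         return 'BCA'
--     if best == 3:
--         return None
--     return education[0]
-- ===== Notes on version B (the rewrite author's own statement) =====
-- stated objective: simpler
-- what changed: Replaces A's eight sequential full passes over the list (several of them unreachable, their word sets being subsets of the master set) with one single pass that keeps the best (minimum) category priority seen, then maps the best priority to the label.
-- outside the precondition, e.g. on filter_education([]): A returns [], B raises IndexError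
import Mathlib
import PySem

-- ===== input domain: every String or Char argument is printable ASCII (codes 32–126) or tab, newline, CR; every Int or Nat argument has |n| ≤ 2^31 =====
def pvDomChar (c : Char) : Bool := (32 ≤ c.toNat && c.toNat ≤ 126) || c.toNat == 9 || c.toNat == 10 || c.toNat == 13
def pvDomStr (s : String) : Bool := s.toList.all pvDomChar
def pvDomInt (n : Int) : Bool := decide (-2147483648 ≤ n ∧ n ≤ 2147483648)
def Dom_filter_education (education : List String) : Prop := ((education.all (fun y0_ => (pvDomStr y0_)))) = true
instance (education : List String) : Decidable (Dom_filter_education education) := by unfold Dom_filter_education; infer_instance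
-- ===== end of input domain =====

-- B replaces A's eight sequential passes over the list by one single pass keeping the best
-- (minimum) category priority seen; objective: simpler. Equivalence is about the return value.


-- ===== PORT A =====
-- deg.replace(".", " ")
def pvNorm (d : String) : String := PySem.Str.replace d "." " "

-- one of A's 'for deg in education: deg = deg.replace(".", " "); if <test>(deg): return …' passes
def pvPass (p : String → Bool) : List String → Bool
  | [] => false
  | d :: rest => if p (pvNorm d) then true else pvPass p rest

def filter_education (education : List String) : Option String :=
  if pvPass (fun s => ["p.hd","phd","p hd","doctorate"].contains s) education then some "P.hD"
  else if pvPass (fun s => ["master","masters","ms","m s","msc","m sc","mba","mcom","m com","mca","m tech","mtech","m b a","m phil","ca","c a"].contains s) education then some "M.Sc"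
  else if pvPass (fun s => ["m tech","mtech","m b a","m phil","ca","c a"].contains s) education then some "M.Tech"
  else if pvPass (fun s => ["m b a","m phil","ca","c a"].contains s) education then some "M.B.A"
  else if pvPass (fun s => ["m phil"].contains s) education then some "M.phil"
  else if pvPass (fun s => s == "bca" || s == "b ca") education then some "BCA"
  else if pvPass (fun s => ["ca","c a"].contains s) education then some "CA"
  else if pvPass (fun s => ["bs","bsc","bachelor","bachelors","b s","b sc","be","b e","btech","b tech","ba","b a","bca","b ca","b com","bcom"].contains s) education then none
  else match education.head? with
       -- try: return education[0]
       | some h => some h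
       -- except: A returns the LIST education itself — not an Option String value; excluded by Pre_
       | none => none

-- ===== PORT B =====
def pvPhd : List String := ["p.hd", "phd", "p hd", "doctorate"]
def pvMaster : List String := ["master","masters","ms","m s","msc","m sc","mba","mcom","m com","mca","m tech","mtech","m b a","m phil","ca","c a"]
def pvBcaW : List String := ["bca", "b ca"]
def pvBachelor : List String := ["bs","bsc","bachelor","bachelors","b s","b sc","be","b e","btech","b tech","ba","b a","bca","b ca","b com","bcom"]

def pvPriority (deg : String) : Option Nat :=
  if pvPhd.contains deg then some 0
  else if pvMaster.contains deg then some 1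
  else if pvBcaW.contains deg then some 2
  else if pvBachelor.contains deg then some 3
  else none

-- 'if p is not None and (best is None or p < best): best = p'
def pvUpd (best p : Option Nat) : Option Nat :=
  match p with
  | none => best
  | some q =>
    match best with
    | none => some q
    | some b => if q < b then some q else some b

def pvGo (orig : List String) : List String → Option Nat → Option String
  | [], best =>
    if best = some 1 then some "M.Sc"
    else if best = some 2 then some "BCA"
    else if best = some 3 then none
    else match orig.head? with   -- return education[0]; IndexError on [] (outside Pre_)
         | some h => some h
         | none => none
  | d :: rest, best =>
    let p := pvPriority (pvNorm d)
    if p = some 0 then some "P.hD"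
    else pvGo orig rest (pvUpd best p)

def filter_education_alt (education : List String) : Option String :=
  pvGo education education none

-- ===== PRECONDITION & SPEC =====
-- Pre_ excludes only the empty list: there A's bare 'except' returns the whole list education
-- itself, which is not a value of the declared Option String type (B raises IndexError there).
def Pre_filter_education (education : List String) : Prop := education ≠ []
instance (education : List String) : Decidable (Pre_filter_education education) := by unfold Pre_filter_education; infer_instance
def pvWitness_filter_education : List String := ["m.sc"]
def Spec_filter_education (education : List String) (out : Option String) : Prop := out = filter_education_alt education
instance (education : List String) (out : Option String) : Decidable (Spec_filter_education education out) := by unfold Spec_filter_education; infer_instance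

-- ===== CLAIM (what is proved, stated in full; the proofs are below) =====
def Claim_equal_filter_education : Prop := ∀ (education : List String), Dom_filter_education education → Pre_filter_education education → Spec_filter_education education (filter_education education)

-- ===== LEMMAS AND PROOFS =====
def pvCat (d : String) : Option Nat := pvPriority (pvNorm d)
def pvIs (k : Nat) (d : String) : Bool := pvCat d == some k

def pvChain (l : List String) : Option Nat :=
  if l.any (pvIs 1) then some 1
  else if l.any (pvIs 2) then some 2
  else if l.any (pvIs 3) then some 3
  else none

def pvFin (best : Option Nat) (orig : List String) : Option String :=
  if best = some 1 then some "M.Sc"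
  else if best = some 2 then some "BCA"
  else if best = some 3 then none
  else match orig.head? with
       | some h => some h
       | none => none

lemma pvAnyCongr {l : List String} {p q : String → Bool} (h : ∀ d ∈ l, p d = q d) :
    l.any p = l.any q := by
  induction l with
  | nil => rfl
  | cons d t ih =>
    simp only [List.any_cons, h d (by simp), ih (fun x hx => h x (by simp [hx]))]

lemma pvPass_eq_any (p : String → Bool) (l : List String) :
    pvPass p l = l.any (fun d => p (pvNorm d)) := by
  induction l with
  | nil => rfl
  | cons d t ih => by_cases h : p (pvNorm d) <;> simp [pvPass, h, ih]

lemma pvCat_cases (d : String) :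
    pvCat d = none ∨ pvCat d = some 0 ∨ pvCat d = some 1 ∨ pvCat d = some 2 ∨ pvCat d = some 3 := by
  unfold pvCat pvPriority; split_ifs <;> simp

lemma pvIs0_eq (d : String) : pvIs 0 d = pvPhd.contains (pvNorm d) := by
  unfold pvIs pvCat pvPriority; split_ifs <;> simp_all

lemma pvIs1_eq (d : String) (h : pvPhd.contains (pvNorm d) = false) :
    pvIs 1 d = pvMaster.contains (pvNorm d) := by
  unfold pvIs pvCat pvPriority; split_ifs <;> simp_all

lemma pvIs2_eq (d : String) (h : pvPhd.contains (pvNorm d) = false)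
    (h' : pvMaster.contains (pvNorm d) = false) :
    pvIs 2 d = pvBcaW.contains (pvNorm d) := by
  unfold pvIs pvCat pvPriority; split_ifs <;> simp_all

lemma pvIs3_eq (d : String) (h : pvPhd.contains (pvNorm d) = false)
    (h' : pvMaster.contains (pvNorm d) = false)
    (h'' : pvBcaW.contains (pvNorm d) = false) :
    pvIs 3 d = pvBachelor.contains (pvNorm d) := by
  unfold pvIs pvCat pvPriority; split_ifs <;> simp_all

lemma pvBca_eq (s : String) : (s == "bca" || s == "b ca") = pvBcaW.contains s := by
  by_cases h1 : s = "bca" <;> by_cases h2 : s = "b ca" <;> simp [pvBcaW, h1, h2]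

lemma pvSub3 (s : String) (h : (["m tech","mtech","m b a","m phil","ca","c a"] : List String).contains s = true) :
    pvMaster.contains s = true := by
  simp [pvMaster, List.contains_eq_any_beq] at h ⊢
  rcases h with rfl | rfl | rfl | rfl | rfl | rfl <;> simp

lemma pvSub4 (s : String) (h : (["m b a","m phil","ca","c a"] : List String).contains s = true) :
    pvMaster.contains s = true := by
  simp [pvMaster, List.contains_eq_any_beq] at h ⊢
  rcases h with rfl | rfl | rfl | rfl <;> simp

lemma pvSub5 (s : String) (h : (["m phil"] : List String).contains s = true) :
    pvMaster.contains s = true := by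
  simp [pvMaster, List.contains_eq_any_beq] at h ⊢
  rcases h with rfl <;> simp

lemma pvSub7 (s : String) (h : (["ca","c a"] : List String).contains s = true) :
    pvMaster.contains s = true := by
  simp [pvMaster, List.contains_eq_any_beq] at h ⊢
  rcases h with rfl | rfl <;> simp

lemma pvUpd_ne_zero {best p : Option Nat} (hb : best ≠ some 0) (hp : p ≠ some 0) :
    pvUpd best p ≠ some 0 := by
  rcases p with _ | q
  · simpa [pvUpd] using hb
  · rcases best with _ | b
    · simpa [pvUpd] using hp
    · simp only [pvUpd]
      split_ifs <;> simp_all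

lemma pvGo_spec (l : List String) (best : Option Nat) (orig : List String) (hb : best ≠ some 0) :
    pvGo orig l best =
      if l.any (pvIs 0) then some "P.hD"
      else pvFin (l.foldl (fun b d => pvUpd b (pvCat d)) best) orig := by
  induction l generalizing best with
  | nil => rfl
  | cons d rest ih =>
    have hg : pvGo orig (d :: rest) best =
        if pvCat d = some 0 then some "P.hD"
        else pvGo orig rest (pvUpd best (pvCat d)) := rfl
    by_cases h : pvCat d = some 0
    · have h0 : pvIs 0 d = true := by simp [pvIs, h]
      rw [hg, if_pos h]
      simp [List.any_cons, h0]
    · have h0 : pvIs 0 d = false := by simp [pvIs, h]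
      rw [hg, if_neg h, ih _ (pvUpd_ne_zero hb h)]
      simp [List.any_cons, h0, List.foldl_cons]

lemma pvFoldl_chain (l : List String) (best : Option Nat) (h0 : l.any (pvIs 0) = false)
    (hb : best ≠ some 0) :
    l.foldl (fun b d => pvUpd b (pvCat d)) best = pvUpd best (pvChain l) := by
  induction l generalizing best with
  | nil => rfl
  | cons d rest ih =>
    simp only [List.any_cons, Bool.or_eq_false_iff] at h0
    obtain ⟨hd0, hrest⟩ := h0
    have hcd : pvCat d ≠ some 0 := by
      intro hc; simp [pvIs, hc] at hd0
    rw [List.foldl_cons, ih _ hrest (pvUpd_ne_zero hb hcd)]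
    -- updB (updB best (cat d)) (chain rest) = updB best (chain (d::rest))
    rcases pvCat_cases d with hc | hc | hc | hc | hc
    · have e1 : pvIs 1 d = false := by simp [pvIs, hc]
      have e2 : pvIs 2 d = false := by simp [pvIs, hc]
      have e3 : pvIs 3 d = false := by simp [pvIs, hc]
      simp [pvChain, List.any_cons, e1, e2, e3, hc, pvUpd]
    · exact absurd hc hcd
    · have e1 : pvIs 1 d = true := by simp [pvIs, hc]
      rw [hc]
      simp only [pvChain, List.any_cons, e1, Bool.true_or, if_pos rfl]
      rcases best with _ | b <;> simp [pvUpd, pvChain] <;> split_ifs <;> simp [pvUpd] <;> omega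
    · have e1 : pvIs 1 d = false := by simp [pvIs, hc]
      have e2 : pvIs 2 d = true := by simp [pvIs, hc]
      rw [hc]
      simp only [pvChain, List.any_cons, e1, e2, Bool.false_or, Bool.true_or]
      rcases best with _ | b <;> by_cases h1 : rest.any (pvIs 1) <;>
        simp [pvUpd, h1] <;> split_ifs <;> simp [pvUpd] <;> omega
    · have e1 : pvIs 1 d = false := by simp [pvIs, hc]
      have e2 : pvIs 2 d = false := by simp [pvIs, hc]
      have e3 : pvIs 3 d = true := by simp [pvIs, hc]
      rw [hc]
      simp only [pvChain, List.any_cons, e1, e2, e3, Bool.false_or, Bool.true_or]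
      rcases best with _ | b <;> by_cases h1 : rest.any (pvIs 1) <;> by_cases h2 : rest.any (pvIs 2) <;>
        simp [pvUpd, h1, h2] <;> split_ifs <;> simp [pvUpd] <;> omega

lemma pvPhd_def : (["p.hd","phd","p hd","doctorate"] : List String) = pvPhd := rfl
lemma pvMaster_def : (["master","masters","ms","m s","msc","m sc","mba","mcom","m com","mca","m tech","mtech","m b a","m phil","ca","c a"] : List String) = pvMaster := rfl
lemma pvBach_def : (["bs","bsc","bachelor","bachelors","b s","b sc","be","b e","btech","b tech","ba","b a","bca","b ca","b com","bcom"] : List String) = pvBachelor := rfl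

-- ===== VERDICT (by name: the statement is the Claim_ definition above) =====
theorem filter_education_spec : Claim_equal_filter_education := by
  intro ed hdom hpre
  unfold Spec_filter_education
  obtain ⟨a, t, rfl⟩ := List.exists_cons_of_ne_nil hpre
  set ed := a :: t with hed
  by_cases h0 : ed.any (pvIs 0) = true
  · have hA : pvPass (fun s => pvPhd.contains s) ed = true := by
      rw [pvPass_eq_any, pvAnyCongr (fun d _ => (pvIs0_eq d).symm)]
      exact h0
    have hB : filter_education_alt ed = some "P.hD" := by
      unfold filter_education_alt
      rw [pvGo_spec _ _ _ (by simp), h0]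
      simp
    rw [hB]
    unfold filter_education
    rw [pvPhd_def, pvMaster_def, pvBach_def, hA]
    simp
  · replace h0 : ed.any (pvIs 0) = false := by simpa using h0
    have hph : ∀ d ∈ ed, pvPhd.contains (pvNorm d) = false := by
      intro d hd
      have := (List.any_eq_false.mp h0) d hd
      rw [← pvIs0_eq]; simpa using this
    have hB : filter_education_alt ed = pvFin (pvChain ed) ed := by
      unfold filter_education_alt
      rw [pvGo_spec _ _ _ (by simp), h0, pvFoldl_chain ed none h0 (by simp)]
      rcases pvChain ed <;> rfl
    have hA1 : pvPass (fun s => pvPhd.contains s) ed = false := by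
      rw [pvPass_eq_any, pvAnyCongr (fun d _ => (pvIs0_eq d).symm)]
      exact h0
    rw [hB]
    unfold filter_education
    rw [pvPhd_def, pvMaster_def, pvBach_def, hA1]
    simp only [Bool.false_eq_true, if_false]
    by_cases h1 : ed.any (pvIs 1) = true
    · have hA2 : pvPass (fun s => pvMaster.contains s) ed = true := by
        rw [pvPass_eq_any, pvAnyCongr (fun d hd => (pvIs1_eq d (hph d hd)).symm)]
        exact h1
      rw [hA2]
      simp [pvFin, pvChain, h1]
    · replace h1 : ed.any (pvIs 1) = false := by simpa using h1
      have hma : ∀ d ∈ ed, pvMaster.contains (pvNorm d) = false := by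
        intro d hd
        have := (List.any_eq_false.mp h1) d hd
        rw [← pvIs1_eq d (hph d hd)]; simpa using this
      have hA2 : pvPass (fun s => pvMaster.contains s) ed = false := by
        rw [pvPass_eq_any, pvAnyCongr (fun d hd => (pvIs1_eq d (hph d hd)).symm)]
        exact h1
      have hA3 : pvPass (fun s => (["m tech","mtech","m b a","m phil","ca","c a"] : List String).contains s) ed = false := by
        rw [pvPass_eq_any]
        refine List.any_eq_false.mpr (fun d hd => ?_)
        intro hc
        exact absurd (pvSub3 _ hc) (by simpa using hma d hd)
      have hA4 : pvPass (fun s => (["m b a","m phil","ca","c a"] : List String).contains s) ed = false := by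
        rw [pvPass_eq_any]
        refine List.any_eq_false.mpr (fun d hd => ?_)
        intro hc
        exact absurd (pvSub4 _ hc) (by simpa using hma d hd)
      have hA5 : pvPass (fun s => (["m phil"] : List String).contains s) ed = false := by
        rw [pvPass_eq_any]
        refine List.any_eq_false.mpr (fun d hd => ?_)
        intro hc
        exact absurd (pvSub5 _ hc) (by simpa using hma d hd)
      have hA7 : pvPass (fun s => (["ca","c a"] : List String).contains s) ed = false := by
        rw [pvPass_eq_any]
        refine List.any_eq_false.mpr (fun d hd => ?_)
        intro hc
        exact absurd (pvSub7 _ hc) (by simpa using hma d hd)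
      rw [hA2, hA3, hA4, hA5]
      simp only [Bool.false_eq_true, if_false]
      by_cases h2 : ed.any (pvIs 2) = true
      · have hA6 : pvPass (fun s => s == "bca" || s == "b ca") ed = true := by
          rw [pvPass_eq_any,
              pvAnyCongr (fun d hd => (pvBca_eq (pvNorm d)).trans (pvIs2_eq d (hph d hd) (hma d hd)).symm)]
          exact h2
        rw [hA6]
        simp [pvFin, pvChain, h1, h2]
      · replace h2 : ed.any (pvIs 2) = false := by simpa using h2
        have hbc : ∀ d ∈ ed, pvBcaW.contains (pvNorm d) = false := by
          intro d hd
          have := (List.any_eq_false.mp h2) d hd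
          rw [← pvIs2_eq d (hph d hd) (hma d hd)]; simpa using this
        have hA6 : pvPass (fun s => s == "bca" || s == "b ca") ed = false := by
          rw [pvPass_eq_any,
              pvAnyCongr (fun d hd => (pvBca_eq (pvNorm d)).trans (pvIs2_eq d (hph d hd) (hma d hd)).symm)]
          exact h2
        rw [hA6, hA7]
        simp only [Bool.false_eq_true, if_false]
        by_cases h3 : ed.any (pvIs 3) = true
        · have hA8 : pvPass (fun s => pvBachelor.contains s) ed = true := by
            rw [pvPass_eq_any,
                pvAnyCongr (fun d hd => (pvIs3_eq d (hph d hd) (hma d hd) (hbc d hd)).symm)]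
            exact h3
          rw [hA8]
          simp [pvFin, pvChain, h1, h2, h3]
        · replace h3 : ed.any (pvIs 3) = false := by simpa using h3
          have hA8 : pvPass (fun s => pvBachelor.contains s) ed = false := by
            rw [pvPass_eq_any,
                pvAnyCongr (fun d hd => (pvIs3_eq d (hph d hd) (hma d hd) (hbc d hd)).symm)]
            exact h3
          rw [hA8]
          have hch : pvChain ed = none := by
            unfold pvChain
            rw [h1, h2, h3]
            rfl
          rw [hch]
          simp [pvFin, hed]
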